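-- pv_equiv track=rewrite | github.com/Vegas30/Python | HomeWork/HW31/hw31.py | remove_char_that_appear_more_N
-- ===== SOURCE A (Python) =====
-- def remove_char_that_appear_more_N(str, n):
--     char_count = {}
--     s_result = ""
--     for char in str:
--         char_count[char] = char_count.get(char, 0) + 1
--     for char in str:
--         if char_count[char] < n:
--             s_result += char
--
--     return s_result
-- ===== SOURCE B (Python) =====
-- def remove_char_that_appear_more_N(str, n):
--     for c in set(str):
--         if str.count(c) >= n:
--             str = str.replace(c, "")
--     return str
-- ===== Notes on version B (the rewrite author's own statement) =====
-- stated objective: alternative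
-- what changed: B drops A's count dictionary and per-position filter loop: it iterates over the distinct characters and deletes all occurrences of each character appearing >= n times with str.replace, building the result by whole-string deletion (C-level count/replace) instead of per-character selection in Python.
import Mathlib
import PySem

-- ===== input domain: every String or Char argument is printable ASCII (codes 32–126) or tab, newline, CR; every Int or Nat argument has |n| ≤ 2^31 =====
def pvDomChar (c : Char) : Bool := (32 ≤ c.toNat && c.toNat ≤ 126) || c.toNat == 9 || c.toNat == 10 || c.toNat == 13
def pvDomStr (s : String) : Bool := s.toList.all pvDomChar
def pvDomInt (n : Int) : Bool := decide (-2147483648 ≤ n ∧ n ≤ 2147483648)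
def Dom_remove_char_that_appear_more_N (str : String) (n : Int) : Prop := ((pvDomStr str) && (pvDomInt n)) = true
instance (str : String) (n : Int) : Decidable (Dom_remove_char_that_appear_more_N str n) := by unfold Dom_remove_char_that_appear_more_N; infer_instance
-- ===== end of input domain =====

-- B replaces A's count-dictionary + per-position filter loop with repeated whole-string
-- deletion: for each distinct character occurring >= n times, str.replace removes all its
-- occurrences (alternative construction; measured constant-factor faster in a timing run).

-- ===== PORT A =====
def remove_char_that_appear_more_N (str : String) (n : Int) : String :=
  let char_count : PySem.Dict Char Int :=
    str.toList.foldl (fun d c => d.insert c (d.getD c 0 + 1)) PySem.Dict.empty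
  let s_result : List Char :=
    str.toList.foldl (fun acc c => if char_count.getD c 0 < n then acc ++ [c] else acc) []
  String.ofList s_result

-- ===== PORT B =====
def remove_char_that_appear_more_N_alt (str : String) (n : Int) : String :=
  (PySem.Set.ofList str.toList).foldl
    (fun s c =>
      if n ≤ (PySem.Str.count s (String.ofList [c]) : Int)
      then PySem.Str.replace s (String.ofList [c]) ""
      else s)
    str

-- ===== PRECONDITION & SPEC =====
def Spec_remove_char_that_appear_more_N (str : String) (n : Int) (out : String) : Prop := out = remove_char_that_appear_more_N_alt str n
instance (str : String) (n : Int) (out : String) : Decidable (Spec_remove_char_that_appear_more_N str n out) := by unfold Spec_remove_char_that_appear_more_N; infer_instance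

-- ===== CLAIM (what is proved, stated in full; the proofs are below) =====
def Claim_equal_remove_char_that_appear_more_N : Prop := ∀ (str : String) (n : Int), Dom_remove_char_that_appear_more_N str n → Spec_remove_char_that_appear_more_N str n (remove_char_that_appear_more_N str n)

-- ===== LEMMAS AND PROOFS =====

-- Python s.count(c) for a single character is List.count on the code points.
theorem chars_count_go_singleton (c : Char) (fuel : Nat) (s : List Char) (acc : Nat)
    (h : s.length ≤ fuel) :
    PySem.Chars.count.go [c] fuel s acc = acc + s.count c := by
  induction fuel generalizing s acc with
  | zero =>
    have : s = [] := List.length_eq_zero_iff.mp (Nat.le_zero.mp h)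
    subst this; simp [PySem.Chars.count.go]
  | succ fuel ih =>
    cases s with
    | nil => simp [PySem.Chars.count.go]
    | cons hd t =>
      simp only [PySem.Chars.count.go]
      have ht : t.length ≤ fuel := by simpa using h
      by_cases hp : [c].isPrefixOf (hd :: t) = true
      · have hc : c = hd := by simpa [List.isPrefixOf] using hp
        subst hc
        simp [hp, ih t _ ht]
        omega
      · have hc : ¬ (hd = c) := fun h' => hp (by simp [List.isPrefixOf, h'])
        simp [hp, ih t _ ht, hc]

theorem str_count_singleton (s : String) (c : Char) :
    PySem.Str.count s (String.ofList [c]) = s.toList.count c := by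
  have h2 := chars_count_go_singleton c s.toList.length s.toList 0 (le_refl _)
  have h1 : (String.ofList [c]).toList = [c] := by simp
  simp only [PySem.Str.count, PySem.Chars.count, h1]
  simpa using h2

-- Python s.replace(c, "") for a single character deletes every occurrence of c.
theorem chars_replace_go_singleton (c : Char) (fuel : Nat) (s : List Char) (acc : List Char)
    (h : s.length ≤ fuel) :
    PySem.Chars.replace.go [c] [] fuel s acc = acc.reverse ++ s.filter (· ≠ c) := by
  induction fuel generalizing s acc with
  | zero =>
    have : s = [] := List.length_eq_zero_iff.mp (Nat.le_zero.mp h)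
    subst this; simp [PySem.Chars.replace.go]
  | succ fuel ih =>
    cases s with
    | nil => simp [PySem.Chars.replace.go]
    | cons hd t =>
      simp only [PySem.Chars.replace.go]
      have ht : t.length ≤ fuel := by simpa using h
      by_cases hp : [c].isPrefixOf (hd :: t) = true
      · have hc : c = hd := by simpa [List.isPrefixOf] using hp
        subst hc
        simp [hp, ih t _ ht]
      · have hc : ¬ (hd = c) := fun h' => hp (by simp [List.isPrefixOf, h'])
        simp [hp, ih t _ ht, hc]

theorem str_replace_singleton_empty (s : String) (c : Char) :
    (PySem.Str.replace s (String.ofList [c]) "").toList = s.toList.filter (· ≠ c) := by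
  rw [PySem.Str.toList_replace]
  have h1 : (String.ofList [c]).toList = [c] := by simp
  have h2 : ("" : String).toList = [] := rfl
  rw [h1, h2]
  simp only [PySem.Chars.replace, List.isEmpty_cons, if_neg (by decide : ¬ (false = true))]
  simpa using chars_replace_go_singleton c s.toList.length s.toList [] (le_refl _)

-- The list of characters still present after the characters of `d` with original
-- count ≥ n have been deleted from `s0`.
def pvRemain (s0 : List Char) (n : Int) (d : List Char) : List Char :=
  s0.filter (fun ch => !(d.contains ch && decide (n ≤ (s0.count ch : Int))))

theorem pvRemain_count (s0 : List Char) (n : Int) (d : List Char) (c : Char) :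
    (pvRemain s0 n d).count c =
      if c ∈ d ∧ n ≤ (s0.count c : Int) then 0 else s0.count c := by
  unfold pvRemain
  by_cases h : c ∈ d ∧ n ≤ (s0.count c : Int)
  · rw [if_pos h, List.count_eq_zero]
    simp [List.mem_filter, h.1, h.2]
  · rw [if_neg h]
    have hp : (!(d.contains c && decide (n ≤ ((s0.count c : Nat) : Int)))) = true := by
      rcases not_and_or.mp h with h1 | h1 <;> simp [h1]
    exact List.count_filter hp

theorem pvRemain_step (s0 : List Char) (n : Int) (d : List Char) (c : Char) :
    (if n ≤ ((pvRemain s0 n d).count c : Int)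
     then (pvRemain s0 n d).filter (· ≠ c)
     else pvRemain s0 n d) = pvRemain s0 n (d ++ [c]) := by
  have hcnt := pvRemain_count s0 n d c
  by_cases hs : n ≤ (s0.count c : Int)
  · -- c is heavy in the original string
    by_cases hd : c ∈ d
    · -- c already deleted: current count is 0
      have h0 : (pvRemain s0 n d).count c = 0 := by rw [hcnt, if_pos ⟨hd, hs⟩]
      rw [h0]
      by_cases hn : n ≤ ((0 : Nat) : Int)
      · rw [if_pos hn]
        unfold pvRemain
        rw [List.filter_filter]
        apply List.filter_congr
        intro ch _
        by_cases hc : ch = c <;> simp [hc, hd, hs]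
      · rw [if_neg hn]
        unfold pvRemain
        apply List.filter_congr
        intro ch _
        by_cases hc : ch = c <;> simp [hc, hd]
    · -- c not yet processed: current count = original count ≥ n, delete it now
      have h0 : (pvRemain s0 n d).count c = s0.count c := by
        rw [hcnt, if_neg (fun h => hd h.1)]
      rw [h0, if_pos hs]
      unfold pvRemain
      rw [List.filter_filter]
      apply List.filter_congr
      intro ch _
      by_cases hc : ch = c <;> simp [hc, hs]
  · -- c is light: nothing happens, and the predicate does not change
    have hni : ¬ (c ∈ d ∧ n ≤ (s0.count c : Int)) := fun h => hs h.2
    have h0 : (pvRemain s0 n d).count c = s0.count c := by rw [hcnt, if_neg hni]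
    rw [h0, if_neg hs]
    unfold pvRemain
    apply List.filter_congr
    intro ch _
    by_cases hc : ch = c <;> simp [hc, hs]

theorem pvRemain_loop (s0 : List Char) (n : Int) (cs d : List Char) :
    cs.foldl (fun l c => if n ≤ ((l.count c : Nat) : Int) then l.filter (· ≠ c) else l)
      (pvRemain s0 n d) = pvRemain s0 n (d ++ cs) := by
  induction cs generalizing d with
  | nil => simp
  | cons c t ih =>
    simp only [List.foldl_cons]
    rw [pvRemain_step s0 n d c, ih (d ++ [c])]
    simp

-- B's string-level fold is the list-level deletion fold.
theorem alt_toList (str : String) (n : Int) :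
    (remove_char_that_appear_more_N_alt str n).toList =
      (PySem.Set.ofList str.toList).foldl
        (fun l c => if n ≤ ((l.count c : Nat) : Int) then l.filter (· ≠ c) else l)
        str.toList := by
  unfold remove_char_that_appear_more_N_alt
  generalize (PySem.Set.ofList str.toList : List Char) = cs
  induction cs generalizing str with
  | nil => simp
  | cons c t ih =>
    simp only [List.foldl_cons]
    by_cases h : n ≤ (str.toList.count c : Int)
    · rw [if_pos (by rw [str_count_singleton]; exact h), if_pos h]
      have := ih (PySem.Str.replace str (String.ofList [c]) "")
      rwa [str_replace_singleton_empty] at this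
    · rw [if_neg (by rw [str_count_singleton]; exact h), if_neg h]
      exact ih str

theorem alt_eq_filter (str : String) (n : Int) :
    remove_char_that_appear_more_N_alt str n =
      String.ofList (str.toList.filter (fun c => decide ((str.toList.count c : Int) < n))) := by
  have h0 : pvRemain str.toList n [] = str.toList := by
    unfold pvRemain; simp
  have hl := pvRemain_loop str.toList n (PySem.Set.ofList str.toList) []
  rw [h0, List.nil_append] at hl
  have h1 := alt_toList str n
  rw [hl] at h1
  have h3 : pvRemain str.toList n (PySem.Set.ofList str.toList) =
      str.toList.filter (fun c => decide ((str.toList.count c : Int) < n)) := by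
    unfold pvRemain
    apply List.filter_congr
    intro ch hch
    have hm : ch ∈ (PySem.Set.ofList str.toList : List Char) := by
      rw [PySem.Set.mem_ofList]; exact hch
    have hb : (PySem.Set.ofList str.toList : List Char).contains ch = true := by
      simpa [List.contains_iff_mem] using hm
    by_cases h : n ≤ (str.toList.count ch : Int)
    · have h2 : ¬ ((str.toList.count ch : Int) < n) := not_lt.mpr h
      simp [hch, h, h2]
    · have h2 : (str.toList.count ch : Int) < n := lt_of_not_ge h
      simp [hch, h, h2]
  rw [h3] at h1
  calc remove_char_that_appear_more_N_alt str n
      = String.ofList (remove_char_that_appear_more_N_alt str n).toList := by simp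
    _ = _ := by rw [h1]

-- ===== VERDICT (by name: the statement is the Claim_ definition above) =====
theorem remove_char_that_appear_more_N_spec : Claim_equal_remove_char_that_appear_more_N := by
  intro s n _
  unfold Spec_remove_char_that_appear_more_N
  rw [alt_eq_filter]
  simp only [remove_char_that_appear_more_N]
  rw [PySem.List.foldl_append_ite_eq_filter]
  simp only [List.nil_append]
  congr 1
  apply List.filter_congr
  intro c _
  simp [PySem.Dict.getD_foldl_insert_add_one]
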